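-- pv_equiv track=rewrite | github.com/powerof3/MainMenuVideo | parse_commonlib_types.py | _tmpl_arg_fuzzy_eq
-- ===== SOURCE A (Python) =====
-- def _parse_tmpl(name):
--     """Split 'Outer<A,B>' into ('Outer', ['A', 'B']).  Returns (name, []) for non-templates."""
--     lt = name.find('<')
--     if lt < 0 or not name.endswith('>'):
--         return name, []
--     outer = name[:lt]
--     inner = name[lt + 1:-1]
--     args, depth, start = [], 0, 0
--     for i, c in enumerate(inner):
--         if c == '<':
--             depth += 1
--         elif c == '>':
--             depth -= 1
--         elif c == ',' and depth == 0:
--             a = inner[start:i].strip()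
--             if a:
--                 args.append(a)
--             start = i + 1
--     a = inner[start:].strip()
--     if a:
--         args.append(a)
--     return outer, args
--
-- def _tmpl_arg_fuzzy_eq(lc, pdb):
--     """True if lc matches pdb, tolerating a missing leading 'RE::' on lc and/or
--     trailing default template arguments present in pdb but absent in lc."""
--     if lc == pdb:
--         return True
--     if 'RE::' + lc == pdb:
--         return True
--     lc_o, lc_a = _parse_tmpl(lc)
--     pdb_o, pdb_a = _parse_tmpl(pdb)
--     if lc_o != pdb_o and 'RE::' + lc_o != pdb_o:
--         return False
--     if len(lc_a) > len(pdb_a):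
--         return False
--     return all(_tmpl_arg_fuzzy_eq(la, pa) for la, pa in zip(lc_a, pdb_a))
-- ===== SOURCE B (Python) =====
-- def _split_top(inner):
--     """Split a template-argument string at top-level commas into stripped,
--     non-empty pieces, carried in an explicit character buffer."""
--     pieces, buf, depth = [], [], 0
--     for c in inner:
--         if c == '<':
--             depth += 1
--             buf.append(c)
--         elif c == '>':
--             depth -= 1
--             buf.append(c)
--         elif c == ',' and depth == 0:
--             a = ''.join(buf).strip()
--             if a:
--                 pieces.append(a)
--             buf = []
--         else:
--             buf.append(c)
--     a = ''.join(buf).strip()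
--     if a:
--         pieces.append(a)
--     return pieces
--
-- def _full_parse(name):
--     """Parse a type name into a tree (outer_name, [child trees...])."""
--     lt = name.find('<')
--     if lt < 0 or not name.endswith('>'):
--         return (name, [])
--     return (name[:lt], [_full_parse(p) for p in _split_top(name[lt + 1:-1])])
--
-- def _tree_le(a, b):
--     an, ac = a
--     bn, bc = b
--     if an != bn and 'RE::' + an != bn:
--         return False
--     if len(ac) > len(bc):
--         return False
--     return all(_tree_le(x, y) for x, y in zip(ac, bc))
--
-- def _tmpl_arg_fuzzy_eq(lc, pdb):
--     return _tree_le(_full_parse(lc), _full_parse(pdb))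
-- ===== Notes on version B (the rewrite author's own statement) =====
-- stated objective: alternative
-- what changed: A compares strings recursively, re-parsing one template level per comparison call and short-circuiting on raw string equality; B first fully parses each name into a nested tree (using a buffer-based top-level splitter instead of index slicing) and then runs a pure tree comparison with no string short-circuits.
import Mathlib
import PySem

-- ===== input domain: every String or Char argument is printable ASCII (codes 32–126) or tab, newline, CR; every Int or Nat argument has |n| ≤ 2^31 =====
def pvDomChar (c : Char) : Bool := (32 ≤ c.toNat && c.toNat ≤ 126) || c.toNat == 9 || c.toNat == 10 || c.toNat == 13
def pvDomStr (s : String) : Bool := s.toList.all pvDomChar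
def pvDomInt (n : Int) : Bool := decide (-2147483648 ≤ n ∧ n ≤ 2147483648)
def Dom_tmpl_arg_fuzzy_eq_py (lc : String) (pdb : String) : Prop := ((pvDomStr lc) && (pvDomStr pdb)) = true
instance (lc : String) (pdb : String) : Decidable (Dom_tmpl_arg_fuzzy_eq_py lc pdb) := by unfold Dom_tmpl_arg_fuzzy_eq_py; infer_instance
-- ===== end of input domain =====

-- B re-implements A by fully parsing each name into a tree once (with a buffer-based
-- top-level splitter) and comparing trees, instead of A's per-level re-parsing string
-- recursion with raw-string short-circuits; objective: alternative decomposition.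

-- ===== PORT A =====

-- 'RE::' as a character list
def pvRE : List Char := ['R', 'E', ':', ':']

theorem pvStripLe (s : List Char) : (PySem.Chars.strip s).length ≤ s.length := by
  simp only [PySem.Chars.strip, PySem.Chars.rstrip, PySem.Chars.lstrip, List.length_reverse]
  calc (List.dropWhile PySem.Chars.isspace (List.dropWhile PySem.Chars.isspace s).reverse).length
      ≤ (List.dropWhile PySem.Chars.isspace s).reverse.length := List.length_dropWhile_le _ _
    _ ≤ s.length := by rw [List.length_reverse]; exact List.length_dropWhile_le _ _

theorem pvSliceLe {α : Type} (xs : List α) (a? b? : Option Int) :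
    (PySem.List.slice xs a? b?).length ≤ xs.length := by
  simp only [PySem.List.slice, List.length_take, List.length_drop]
  omega

theorem pvEndsNe (name : List Char) (hend : PySem.Chars.endswith name ['>'] = true) :
    name ≠ [] := by
  rintro rfl; exact absurd hend (by decide)

-- one step of A's `for i, c in enumerate(inner)` loop; state = (args, depth, start)
def pvStepA (inner : List Char) (st : List (List Char) × Int × Int) (ic : Int × Char) :
    List (List Char) × Int × Int :=
  if ic.2 = '<' then (st.1, st.2.1 + 1, st.2.2)
  else if ic.2 = '>' then (st.1, st.2.1 - 1, st.2.2)
  else if ic.2 = ',' ∧ st.2.1 = 0 then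
    let a := PySem.Chars.strip (PySem.List.slice inner (some st.2.2) (some ic.1))
    (if a ≠ [] then st.1 ++ [a] else st.1, st.2.1, ic.1 + 1)
  else st

-- port of _parse_tmpl (on List Char)
def pvParseA (name : List Char) : List Char × List (List Char) :=
  let lt := PySem.Chars.find name ['<']
  if lt < 0 ∨ ¬ (PySem.Chars.endswith name ['>'] = true) then (name, [])
  else
    let outer := PySem.List.slice name none (some lt)
    let inner := PySem.List.slice name (some (lt + 1)) (some (-1))
    let st := (PySem.List.enumerate inner 0).foldl (pvStepA inner) ([], 0, 0)
    let a := PySem.Chars.strip (PySem.List.slice inner (some st.2.2) none)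
    (outer, if a ≠ [] then st.1 ++ [a] else st.1)

-- the inner slice is strictly shorter than the name
theorem pvInner_lt (name : List Char) (lt : Int) (hend : PySem.Chars.endswith name ['>'] = true) :
    (PySem.List.slice name (some (lt + 1)) (some (-1))).length < name.length := by
  have hne := pvEndsNe name hend
  have hlen : 1 ≤ name.length := List.length_pos_of_ne_nil hne
  simp only [PySem.List.slice, List.length_take, List.length_drop]
  have h1 : PySem.List.clampIdx name.length (-1) = name.length - 1 :=
    PySem.List.clampIdx_neg_one _
  omega

-- fold invariant: every collected argument is at most as long as inner
theorem pvFoldA_le (inner : List Char) (N : Nat) (hN : inner.length ≤ N) :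
    ∀ (es : List (Int × Char)) (st : List (List Char) × Int × Int),
      (∀ a ∈ st.1, a.length ≤ N) →
      ∀ a ∈ (es.foldl (pvStepA inner) st).1, a.length ≤ N := by
  intro es
  induction es with
  | nil => intro st h a ha; exact h a ha
  | cons e es ih =>
    intro st h a ha
    refine ih _ ?_ a ha
    intro x hx
    simp only [pvStepA] at hx
    split at hx
    · exact h x hx
    · split at hx
      · exact h x hx
      · split at hx
        · simp only at hx
          split at hx
          · rcases List.mem_append.mp hx with hh | hh
            · exact h x hh
            · rcases List.mem_singleton.mp hh with rfl
              have := pvStripLe (PySem.List.slice inner (some st.2.2) (some e.1))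
              have := pvSliceLe inner (some st.2.2) (some e.1)
              omega
          · exact h x hx
        · exact h x hx

-- the produced argument strings are strictly shorter than the input (termination of A's recursion)
theorem pvParseA_arg_lt (name : List Char) : ∀ a ∈ (pvParseA name).2, a.length < name.length := by
  intro a ha
  simp only [pvParseA] at ha
  split at ha
  · simp at ha
  · rename_i h
    have hend : PySem.Chars.endswith name ['>'] = true := not_not.mp (not_or.mp h).2
    have hinner := pvInner_lt name (PySem.Chars.find name ['<']) hend
    set inner := PySem.List.slice name (some (PySem.Chars.find name ['<'] + 1)) (some (-1)) with hinn
    simp only at ha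
    have hfold := pvFoldA_le inner inner.length le_rfl (PySem.List.enumerate inner 0) ([], 0, 0) (by simp)
    split at ha
    · rcases List.mem_append.mp ha with hh | hh
      · have := hfold a hh; omega
      · rcases List.mem_singleton.mp hh with rfl
        have h1 := pvStripLe (PySem.List.slice inner (some ((PySem.List.enumerate inner 0).foldl (pvStepA inner) ([], 0, 0)).2.2) none)
        have h2 := pvSliceLe inner (some ((PySem.List.enumerate inner 0).foldl (pvStepA inner) ([], 0, 0)).2.2) none
        omega
    · have := hfold a ha; omega

-- port of _tmpl_arg_fuzzy_eq (on List Char)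
def pvFuzzyA (lc pdb : List Char) : Bool :=
  if lc = pdb then true
  else if pvRE ++ lc = pdb then true
  else
    let lcp := pvParseA lc
    let pdbp := pvParseA pdb
    if lcp.1 ≠ pdbp.1 ∧ pvRE ++ lcp.1 ≠ pdbp.1 then false
    else if pdbp.2.length < lcp.2.length then false
    else ((lcp.2.zip pdbp.2).attach).all (fun p => pvFuzzyA p.1.1 p.1.2)
termination_by lc.length + pdb.length
decreasing_by
  have h1 := pvParseA_arg_lt lc p.1.1 (List.of_mem_zip p.2).1
  have h2 := pvParseA_arg_lt pdb p.1.2 (List.of_mem_zip p.2).2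
  omega

def tmpl_arg_fuzzy_eq_py (lc : String) (pdb : String) : Bool :=
  pvFuzzyA lc.toList pdb.toList

-- ===== PORT B =====

-- parse tree of a type name (mutual pair instead of a nested inductive)
mutual
inductive PvTNode where
  | node : List Char → PvTList → PvTNode
  deriving DecidableEq
inductive PvTList where
  | nil : PvTList
  | cons : PvTNode → PvTList → PvTList
  deriving DecidableEq
end

def pvToTList : List PvTNode → PvTList
  | [] => .nil
  | t :: ts => .cons t (pvToTList ts)

def pvLenT : PvTList → Nat
  | .nil => 0
  | .cons _ ts => pvLenT ts + 1

-- port of B's _split_top loop (explicit character buffer; structural recursion = the for loop)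
def pvSplitGo : List Char → Int → List Char → List (List Char) → List (List Char)
  | [], _, buf, acc =>
    let a := PySem.Chars.strip buf
    if a ≠ [] then acc ++ [a] else acc
  | c :: rest, depth, buf, acc =>
    if c = '<' then pvSplitGo rest (depth + 1) (buf ++ [c]) acc
    else if c = '>' then pvSplitGo rest (depth - 1) (buf ++ [c]) acc
    else if c = ',' ∧ depth = 0 then
      let a := PySem.Chars.strip buf
      pvSplitGo rest depth [] (if a ≠ [] then acc ++ [a] else acc)
    else pvSplitGo rest depth (buf ++ [c]) acc

def pvSplitTop (inner : List Char) : List (List Char) := pvSplitGo inner 0 [] []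

-- bound on the splitter's pieces
theorem pvSplitGo_le (N : Nat) :
    ∀ (rest : List Char) (depth : Int) (buf : List Char) (acc : List (List Char)),
      (∀ a ∈ acc, a.length ≤ N) → buf.length + rest.length ≤ N →
      ∀ a ∈ pvSplitGo rest depth buf acc, a.length ≤ N := by
  intro rest
  induction rest with
  | nil =>
    intro depth buf acc hacc hlen a ha
    simp only [pvSplitGo] at ha
    split at ha
    · rcases List.mem_append.mp ha with h | h
      · exact hacc a h
      · rcases List.mem_singleton.mp h with rfl
        have := pvStripLe buf; omega
    · exact hacc a ha
  | cons c rest ih =>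
    intro depth buf acc hacc hlen a ha
    simp only [pvSplitGo] at ha
    split at ha
    · exact ih _ _ _ hacc (by simp at hlen ⊢; omega) a ha
    · split at ha
      · exact ih _ _ _ hacc (by simp at hlen ⊢; omega) a ha
      · split at ha
        · refine ih _ _ _ ?_ (by simp at hlen ⊢; omega) a ha
          intro x hx
          split at hx
          · rcases List.mem_append.mp hx with h | h
            · exact hacc x h
            · rcases List.mem_singleton.mp h with rfl
              have := pvStripLe buf; simp at hlen; omega
          · exact hacc x hx
        · exact ih _ _ _ hacc (by simp at hlen ⊢; omega) a ha

-- every piece is at most as long as the input (termination of the tree parser)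
theorem pvSplitTop_le (inner : List Char) : ∀ a ∈ pvSplitTop inner, a.length ≤ inner.length :=
  pvSplitGo_le inner.length inner 0 [] [] (by simp) (by simp)



-- port of B's _full_parse
def pvFullParse (name : List Char) : PvTNode :=
  let lt := PySem.Chars.find name ['<']
  if lt < 0 ∨ ¬ (PySem.Chars.endswith name ['>'] = true) then .node name .nil
  else
    let inner := PySem.List.slice name (some (lt + 1)) (some (-1))
    .node (PySem.List.slice name none (some lt))
      (pvToTList (((pvSplitTop inner).attach).map (fun p => pvFullParse p.1)))
termination_by name.length
decreasing_by
  rename_i h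
  have h1 := pvSplitTop_le inner p.1 p.2
  have h2 := pvInner_lt name (PySem.Chars.find name ['<']) (by
    rcases not_or.mp h with ⟨_, h'⟩
    exact not_not.mp h')
  have h3 : inner.length = (PySem.List.slice name (some (PySem.Chars.find name ['<'] + 1)) (some (-1))).length := rfl
  omega

-- port of B's _tree_le
mutual
def pvTreeLe : PvTNode → PvTNode → Bool
  | .node an ac, .node bn bc =>
    if an ≠ bn ∧ pvRE ++ an ≠ bn then false
    else if pvLenT bc < pvLenT ac then false
    else pvTreeAll ac bc
def pvTreeAll : PvTList → PvTList → Bool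
  | .nil, _ => true
  | .cons _ _, .nil => true
  | .cons a as, .cons b bs => pvTreeLe a b && pvTreeAll as bs
end

def tmpl_arg_fuzzy_eq_py_alt (lc : String) (pdb : String) : Bool :=
  pvTreeLe (pvFullParse lc.toList) (pvFullParse pdb.toList)

-- ===== PRECONDITION & SPEC =====
def Spec_tmpl_arg_fuzzy_eq_py (lc : String) (pdb : String) (out : Bool) : Prop := out = tmpl_arg_fuzzy_eq_py_alt lc pdb
instance (lc : String) (pdb : String) (out : Bool) : Decidable (Spec_tmpl_arg_fuzzy_eq_py lc pdb out) := by unfold Spec_tmpl_arg_fuzzy_eq_py; infer_instance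

-- ===== CLAIM (what is proved, stated in full; the proofs are below) =====
def Claim_equal_tmpl_arg_fuzzy_eq_py : Prop := ∀ (lc : String) (pdb : String), Dom_tmpl_arg_fuzzy_eq_py lc pdb → Spec_tmpl_arg_fuzzy_eq_py lc pdb (tmpl_arg_fuzzy_eq_py lc pdb)

-- ===== LEMMAS AND PROOFS =====

theorem pvStepA_lt (inner : List Char) (st : List (List Char) × Int × Int) (i : Int) :
    pvStepA inner st (i, '<') = (st.1, st.2.1 + 1, st.2.2) := by simp [pvStepA]

theorem pvStepA_gt (inner : List Char) (st : List (List Char) × Int × Int) (i : Int) :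
    pvStepA inner st (i, '>') = (st.1, st.2.1 - 1, st.2.2) := by simp [pvStepA]

theorem pvStepA_comma (inner : List Char) (st : List (List Char) × Int × Int) (i : Int)
    (hd : st.2.1 = 0) :
    pvStepA inner st (i, ',') =
      (if PySem.Chars.strip (PySem.List.slice inner (some st.2.2) (some i)) ≠ [] then
        st.1 ++ [PySem.Chars.strip (PySem.List.slice inner (some st.2.2) (some i))] else st.1,
       st.2.1, i + 1) := by
  simp [pvStepA, hd]

theorem pvStepA_other (inner : List Char) (st : List (List Char) × Int × Int) (i : Int) (c : Char)
    (h1 : ¬ c = '<') (h2 : ¬ c = '>') (h3 : ¬ (c = ',' ∧ st.2.1 = 0)) :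
    pvStepA inner st (i, c) = st := by
  simp [pvStepA, h1, h2, h3]

theorem pvSplitGo_lt (rest : List Char) (depth : Int) (buf : List Char) (acc : List (List Char)) :
    pvSplitGo ('<' :: rest) depth buf acc = pvSplitGo rest (depth + 1) (buf ++ ['<']) acc := by
  simp [pvSplitGo]

theorem pvSplitGo_gt (rest : List Char) (depth : Int) (buf : List Char) (acc : List (List Char)) :
    pvSplitGo ('>' :: rest) depth buf acc = pvSplitGo rest (depth - 1) (buf ++ ['>']) acc := by
  simp [pvSplitGo]

theorem pvSplitGo_comma (rest : List Char) (buf : List Char) (acc : List (List Char)) :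
    pvSplitGo (',' :: rest) 0 buf acc =
      pvSplitGo rest 0 []
        (if PySem.Chars.strip buf ≠ [] then acc ++ [PySem.Chars.strip buf] else acc) := by
  simp [pvSplitGo]

theorem pvSplitGo_other (c : Char) (rest : List Char) (depth : Int) (buf : List Char)
    (acc : List (List Char)) (h1 : ¬ c = '<') (h2 : ¬ c = '>') (h3 : ¬ (c = ',' ∧ depth = 0)) :
    pvSplitGo (c :: rest) depth buf acc = pvSplitGo rest depth (buf ++ [c]) acc := by
  simp [pvSplitGo, h1, h2, h3]

theorem pvGo_eq (inner : List Char) :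
    ∀ (rest : List Char) (k start : Nat) (args : List (List Char)) (depth : Int),
      start ≤ k → inner.drop k = rest →
      (let st := (PySem.List.enumerate rest (k : Int)).foldl (pvStepA inner) (args, depth, (start : Int));
       let a := PySem.Chars.strip (PySem.List.slice inner (some st.2.2) none);
       if a ≠ [] then st.1 ++ [a] else st.1)
      = pvSplitGo rest depth ((inner.take k).drop start) args := by
  intro rest
  induction rest with
  | nil =>
    intro k start args depth hsk hdrop
    simp only [PySem.List.enumerate_nil, List.foldl_nil, pvSplitGo]
    have hk : inner.length ≤ k := by
      by_contra hc
      have := List.drop_eq_nil_iff.mp hdrop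
      omega
    rw [List.take_of_length_le hk, PySem.List.slice_from_natCast]
  | cons c rest ih =>
    intro k start args depth hsk hdrop
    have hklt : k < inner.length := by
      by_contra hc
      rw [List.drop_eq_nil_iff.mpr (by omega)] at hdrop
      exact absurd hdrop (by simp)
    have hdrop' : inner.drop (k + 1) = rest := by
      rw [List.drop_add_one_eq_tail_drop, hdrop]; rfl
    have hget : inner[k]? = some c := by
      have h0 : (inner.drop k)[0]? = inner[k]? := by
        simp [List.getElem?_drop]
      rw [← h0, hdrop]; rfl
    have htake : inner.take (k + 1) = inner.take k ++ [c] := by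
      rw [List.take_add_one, hget]; rfl
    have hbuf : (inner.take (k + 1)).drop start = (inner.take k).drop start ++ [c] := by
      rw [htake, List.drop_append_of_le_length (by simp; omega)]
    rw [PySem.List.enumerate_cons]
    by_cases h1 : c = '<'
    · subst h1
      rw [List.foldl_cons, pvStepA_lt, pvSplitGo_lt, ← hbuf]
      have := ih (k + 1) start args (depth + 1) (by omega) hdrop'
      push_cast at this
      exact this
    · by_cases h2 : c = '>'
      · subst h2
        rw [List.foldl_cons, pvStepA_gt, pvSplitGo_gt, ← hbuf]
        have := ih (k + 1) start args (depth - 1) (by omega) hdrop'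
        push_cast at this
        exact this
      · by_cases h3 : c = ',' ∧ depth = 0
        · obtain ⟨hc, hd⟩ := h3
          subst hc hd
          rw [List.foldl_cons, pvStepA_comma inner _ _ rfl, pvSplitGo_comma]
          have hbufeq : PySem.List.slice inner (some ((start : Nat) : Int)) (some ((k : Nat) : Int)) =
              (inner.take k).drop start := by
            rw [PySem.List.slice_natCast, List.drop_take]
          have hempty : (inner.take (k + 1)).drop (k + 1) = [] :=
            List.drop_eq_nil_iff.mpr (by simp)
          have := ih (k + 1) (k + 1)
            (if PySem.Chars.strip ((inner.take k).drop start) ≠ [] then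
              args ++ [PySem.Chars.strip ((inner.take k).drop start)] else args)
            0 (le_refl _) hdrop'
          rw [hempty] at this
          push_cast at this ⊢
          rw [hbufeq]
          exact this
        · rw [List.foldl_cons, pvStepA_other inner _ _ c h1 h2 (by simpa using h3),
              pvSplitGo_other c _ _ _ _ h1 h2 h3, ← hbuf]
          have := ih (k + 1) start args depth (by omega) hdrop'
          push_cast at this
          exact this

theorem pvParseA_snd_eq (inner : List Char) :
    (let st := (PySem.List.enumerate inner (0 : Int)).foldl (pvStepA inner) ([], 0, (0 : Int));
     let a := PySem.Chars.strip (PySem.List.slice inner (some st.2.2) none);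
     if a ≠ [] then st.1 ++ [a] else st.1) = pvSplitTop inner := by
  have h := pvGo_eq inner inner 0 0 [] 0 (le_refl 0) (by simp)
  simpa [pvSplitTop] using h

-- Bool all over a list is congruent on members
theorem pvAllCongr {α : Type} (l : List α) (p q : α → Bool) (h : ∀ x ∈ l, p x = q x) :
    l.all p = l.all q := by
  induction l with
  | nil => rfl
  | cons a t ih => simp_all

theorem pvLenT_toTList (xs : List PvTNode) : pvLenT (pvToTList xs) = xs.length := by
  induction xs with
  | nil => rfl
  | cons a t ih => simp [pvToTList, pvLenT, ih]

theorem pvTreeAll_toTList (xs ys : List PvTNode) :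
    pvTreeAll (pvToTList xs) (pvToTList ys) = (xs.zip ys).all (fun p => pvTreeLe p.1 p.2) := by
  induction xs generalizing ys with
  | nil => simp [pvToTList, pvTreeAll]
  | cons a t ih =>
    cases ys with
    | nil => simp [pvToTList, pvTreeAll]
    | cons b u => simp [pvToTList, pvTreeAll, ih]

mutual
theorem pvTreeLe_refl : ∀ t, pvTreeLe t t = true
  | .node n c => by simp [pvTreeLe, pvTreeAll_refl c]
theorem pvTreeAll_refl : ∀ l, pvTreeAll l l = true
  | .nil => by simp [pvTreeAll]
  | .cons a as => by simp [pvTreeAll, pvTreeLe_refl a, pvTreeAll_refl as]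
end

-- tolerance of a prefixed outer name is accepted by the tree comparison
theorem pvTreeLe_RE (o : List Char) (c : PvTList) :
    pvTreeLe (.node o c) (.node (pvRE ++ o) c) = true := by
  simp [pvTreeLe, pvTreeAll_refl c]

-- B's parser expressed through A's one-level parse
theorem pvFullParse_eq (name : List Char) :
    pvFullParse name =
      .node (pvParseA name).1 (pvToTList ((pvParseA name).2.map pvFullParse)) := by
  rw [pvFullParse]
  by_cases h : PySem.Chars.find name ['<'] < 0 ∨ ¬ (PySem.Chars.endswith name ['>'] = true)
  · simp only [pvParseA, if_pos h]
    simp [pvToTList]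
  · simp only [pvParseA, if_neg h]
    have hmap : ∀ (xs : List (List Char)),
        (xs.attach.map (fun p => pvFullParse p.1)) = xs.map pvFullParse := by
      intro xs; simp
    rw [hmap]
    have hsnd := pvParseA_snd_eq
      (PySem.List.slice name (some (PySem.Chars.find name ['<'] + 1)) (some (-1)))
    simp only at hsnd ⊢
    rw [← hsnd]

-- single-character suffix reads the last element
theorem pvSingletonSuffix (c : Char) (l : List Char) : [c] <:+ l ↔ l.getLast? = some c := by
  constructor
  · rintro ⟨t, rfl⟩; simp
  · intro h
    have hne : l ≠ [] := by rintro rfl; simp at h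
    refine ⟨l.dropLast, ?_⟩
    have h2 := List.dropLast_append_getLast hne
    rw [List.getLast?_eq_some_getLast (l := l) hne] at h
    rw [show c = l.getLast hne from (Option.some.inj h).symm]
    exact h2

theorem pvEndswith_RE (l : List Char) :
    PySem.Chars.endswith (pvRE ++ l) ['>'] = PySem.Chars.endswith l ['>'] := by
  rcases eq_or_ne l [] with rfl | hne
  · decide
  · have h1 : PySem.Chars.endswith (pvRE ++ l) ['>'] = true ↔ PySem.Chars.endswith l ['>'] = true := by
      rw [PySem.Chars.endswith_iff, PySem.Chars.endswith_iff, pvSingletonSuffix, pvSingletonSuffix,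
        List.getLast?_append_of_ne_nil _ hne]
    by_cases h : PySem.Chars.endswith l ['>'] = true
    · rw [h, h1.mpr h]
    · rw [Bool.eq_false_iff.mpr (fun hc => h (h1.mp hc)), Bool.eq_false_iff.mpr h]

-- find of a single char after a non-matching head
theorem pvFindCons (c d : Char) (hd : d ≠ c) (s : List Char) :
    PySem.Chars.find (d :: s) [c] =
      if PySem.Chars.find s [c] = -1 then -1 else PySem.Chars.find s [c] + 1 := by
  by_cases h : PySem.Chars.find s [c] = -1
  · rw [if_pos h]
    rw [PySem.Chars.find_eq_neg_one_iff] at h ⊢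
    rw [List.singleton_infix_iff] at h ⊢
    simp [hd.symm, h]
  · rw [if_neg h]
    have hf : (0:Int) ≤ PySem.Chars.find s [c] := by
      rw [PySem.Chars.find_nonneg_iff, ← PySem.Chars.find_ne_neg_one_iff]; exact h
    obtain ⟨hpre, hmin⟩ := PySem.Chars.find_spec (s := s) (sub := [c]) hf
    have hinf : [c] <:+: d :: s := by
      have hmem : c ∈ s := (List.singleton_infix_iff c s).mp ((PySem.Chars.find_ne_neg_one_iff (s := s) (sub := [c])).mp h)
      exact (List.singleton_infix_iff c (d :: s)).mpr (List.mem_cons_of_mem d hmem)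
    have hg : (0:Int) ≤ PySem.Chars.find (d :: s) [c] := by
      rw [PySem.Chars.find_nonneg_iff]; exact hinf
    obtain ⟨hpre', hmin'⟩ := PySem.Chars.find_spec (s := d :: s) (sub := [c]) hg
    set f := PySem.Chars.find s [c] with hfdef
    set g := PySem.Chars.find (d :: s) [c] with hgdef
    have hg1 : g.toNat ≠ 0 := by
      intro h0
      rw [h0] at hpre'
      rcases hpre' with ⟨t, ht⟩
      simp at ht
      exact hd (ht.1.symm)
    have hdrop : (d :: s).drop (f.toNat + 1) = s.drop f.toNat := by simp
    have hle : g.toNat ≤ f.toNat + 1 := by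
      by_contra hc
      exact hmin' (f.toNat + 1) (by omega) (by rw [hdrop]; exact hpre)
    have hge : f.toNat ≤ g.toNat - 1 := by
      by_contra hc
      refine hmin (g.toNat - 1) (by omega) ?_
      have : (d :: s).drop g.toNat = s.drop (g.toNat - 1) := by
        cases hgt : g.toNat with
        | zero => exact absurd hgt hg1
        | succ m => simp
      rw [← this]; exact hpre'
    have : g.toNat = f.toNat + 1 := by omega
    omega

theorem pvFind_RE (l : List Char) :
    PySem.Chars.find (pvRE ++ l) ['<'] =
      if PySem.Chars.find l ['<'] = -1 then -1 else PySem.Chars.find l ['<'] + 4 := by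
  have n1 := PySem.Chars.neg_one_le_find (s := l) (sub := (['<'] : List Char))
  show PySem.Chars.find ('R' :: 'E' :: ':' :: ':' :: l) ['<'] = _
  rw [pvFindCons _ 'R' (by decide) _, pvFindCons _ 'E' (by decide) _,
      pvFindCons _ ':' (by decide) _, pvFindCons _ ':' (by decide) _]
  by_cases h : PySem.Chars.find l ['<'] = -1
  · simp [h]
  · rw [if_neg h]
    rw [if_neg (by omega), if_neg (by omega), if_neg (by omega), if_neg h]
    ring

-- xs[a:-1] as drop over dropLast
theorem pvSliceToNegOne (xs : List Char) (a : Nat) :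
    PySem.List.slice xs (some (a : Int)) (some (-1)) = xs.dropLast.drop a := by
  simp only [PySem.List.slice, PySem.List.clampIdx_neg_one, PySem.List.clampIdx_natCast]
  rcases le_or_gt a xs.length with h | h
  · rw [min_eq_left h, List.dropLast_eq_take, List.drop_take]
  · rw [min_eq_right (by omega), List.drop_eq_nil_iff.mpr (by simp),
        List.drop_eq_nil_iff.mpr (by simp; omega), List.take_nil]

-- A's one-level parse commutes with prepending 'RE::'
theorem pvParseA_RE (l : List Char) :
    pvParseA (pvRE ++ l) = (pvRE ++ (pvParseA l).1, (pvParseA l).2) := by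
  have hfre := pvFind_RE l
  have hend := pvEndswith_RE l
  by_cases h : PySem.Chars.find l ['<'] < 0 ∨ ¬ (PySem.Chars.endswith l ['>'] = true)
  · have hcond : PySem.Chars.find (pvRE ++ l) ['<'] < 0 ∨
        ¬ (PySem.Chars.endswith (pvRE ++ l) ['>'] = true) := by
      rcases h with h | h
      · left
        have : PySem.Chars.find l ['<'] = -1 := by
          have := PySem.Chars.neg_one_le_find (s := l) (sub := (['<'] : List Char))
          omega
        rw [hfre, if_pos this]; omega
      · right; rw [hend]; exact h
    simp only [pvParseA, if_pos h, if_pos hcond]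
  · have hf : (0:Int) ≤ PySem.Chars.find l ['<'] := by
      rcases not_or.mp h with ⟨h1, -⟩; omega
    have hne : PySem.Chars.find l ['<'] ≠ -1 := by omega
    have hendT : PySem.Chars.endswith l ['>'] = true := not_not.mp (not_or.mp h).2
    have hlne : l ≠ [] := pvEndsNe l hendT
    have hcond : ¬ (PySem.Chars.find (pvRE ++ l) ['<'] < 0 ∨
        ¬ (PySem.Chars.endswith (pvRE ++ l) ['>'] = true)) := by
      rw [not_or, hfre, if_neg hne, hend]
      exact ⟨by omega, not_not.mpr hendT⟩
    simp only [pvParseA, if_neg h, if_neg hcond]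
    rw [hfre, if_neg hne]
    set f := PySem.Chars.find l ['<'] with hfdef
    have hOuter : PySem.List.slice (pvRE ++ l) none (some (f + 4)) =
        pvRE ++ PySem.List.slice l none (some f) := by
      rw [PySem.List.slice_to (pvRE ++ l) (b := f + 4) (by omega), PySem.List.slice_to l (b := f) hf,
          show (f + 4).toNat = (pvRE : List Char).length + f.toNat by simp [pvRE]; omega,
          List.take_length_add_append]
    have hInner : PySem.List.slice (pvRE ++ l) (some (f + 4 + 1)) (some (-1)) =
        PySem.List.slice l (some (f + 1)) (some (-1)) := by
      rw [show (f + 4 + 1 : Int) = ((f.toNat + 5 : Nat) : Int) by omega,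
          show (f + 1 : Int) = ((f.toNat + 1 : Nat) : Int) by omega,
          pvSliceToNegOne, pvSliceToNegOne,
          List.dropLast_append_of_ne_nil hlne,
          show f.toNat + 5 = (pvRE : List Char).length + (f.toNat + 1) by simp [pvRE]; omega,
          List.drop_length_add_append]
    rw [hOuter, hInner]

theorem pvMainAux : ∀ (n : Nat) (lc pdb : List Char), lc.length + pdb.length ≤ n →
    pvFuzzyA lc pdb = pvTreeLe (pvFullParse lc) (pvFullParse pdb) := by
  intro n
  induction n with
  | zero =>
    intro lc pdb hlen
    have h1 : lc = [] := by cases lc <;> simp_all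
    have h2 : pdb = [] := by cases pdb <;> simp_all
    subst h1; subst h2
    rw [pvFuzzyA]
    simp [pvTreeLe_refl]
  | succ n ih =>
    intro lc pdb hlen
    by_cases hEq : lc = pdb
    · subst hEq
      rw [pvFuzzyA]
      simp [pvTreeLe_refl]
    · by_cases hRE : pvRE ++ lc = pdb
      · subst hRE
        rw [pvFuzzyA]
        simp only [if_neg hEq]
        rw [pvFullParse_eq lc, pvFullParse_eq (pvRE ++ lc), pvParseA_RE]
        exact (pvTreeLe_RE _ _).symm
      · rw [pvFuzzyA]
        simp only [if_neg hEq, if_neg hRE]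
        rw [pvFullParse_eq lc, pvFullParse_eq pdb]
        simp only [pvTreeLe, pvLenT_toTList, List.length_map, pvTreeAll_toTList,
          List.zip_map, List.all_map]
        by_cases hA : (pvParseA lc).1 ≠ (pvParseA pdb).1 ∧ pvRE ++ (pvParseA lc).1 ≠ (pvParseA pdb).1
        · rw [if_pos hA, if_pos hA]
        · rw [if_neg hA, if_neg hA]
          by_cases hB : (pvParseA pdb).2.length < (pvParseA lc).2.length
          · rw [if_pos hB, if_pos hB]
          · rw [if_neg hB, if_neg hB]
            have hatt : (((pvParseA lc).2.zip (pvParseA pdb).2).attach).all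
                (fun p => pvFuzzyA p.1.1 p.1.2) =
                ((pvParseA lc).2.zip (pvParseA pdb).2).all (fun p => pvFuzzyA p.1 p.2) := by
              rw [Bool.eq_iff_iff, List.all_eq_true, List.all_eq_true]
              constructor
              · intro h x hx; exact h ⟨x, hx⟩ (List.mem_attach _ _)
              · intro h p _; exact h p.1 p.2
            rw [hatt]
            refine pvAllCongr _ _ _ ?_
            intro p hp
            have hl := pvParseA_arg_lt lc p.1 (List.of_mem_zip hp).1
            have hr := pvParseA_arg_lt pdb p.2 (List.of_mem_zip hp).2
            have := ih p.1 p.2 (by omega)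
            simpa using this

theorem pvMain (lc pdb : List Char) :
    pvFuzzyA lc pdb = pvTreeLe (pvFullParse lc) (pvFullParse pdb) :=
  pvMainAux (lc.length + pdb.length) lc pdb (le_refl _)

-- ===== VERDICT (by name: the statement is the Claim_ definition above) =====
theorem tmpl_arg_fuzzy_eq_py_spec : Claim_equal_tmpl_arg_fuzzy_eq_py := by
  intro lc pdb _
  unfold Spec_tmpl_arg_fuzzy_eq_py tmpl_arg_fuzzy_eq_py tmpl_arg_fuzzy_eq_py_alt
  exact pvMain lc.toList pdb.toList
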